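-- pv_equiv track=rewrite | github.com/materialsproject/pymatgen | src/pymatgen/io/jdftx/utils.py | gather_JElSteps_line_collections
-- ===== SOURCE A (Python) =====
-- def gather_JElSteps_line_collections(opt_type: str, text_slice: list[str]) -> tuple[list[list[str]], list[str]]:
--     """Gather line collections for JElSteps initialization.
--
--     Gathers list of line lists where each line list initializes a JElStep object,
--     and the remaining lines that do not initialize a JElStep object are used
--     for initialization unique to the JElSteps object.
--
--     Parameters
--     ----------
--     opt_type: str
--         The type of electronic minimization step
--     text_slice: list[str]
--         A slice of text from a JDFTx out file corresponding to a series of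
--         SCF steps
--
--     Returns
--     -------
--     line_collections: list[list[str]]
--         A list of lists of lines of text from a JDFTx out file corresponding to
--         a single SCF step
--     lines_collect: list[str]
--         A list of lines of text from a JDFTx out file corresponding to a single
--         SCF step
--
--     """
--     lines_collect = []
--     line_collections = []
--     _iter_flag = f"{opt_type}: Iter:"
--     for line_text in text_slice:
--         if len(line_text.strip()):
--             lines_collect.append(line_text)
--             if _iter_flag in line_text:
--                 line_collections.append(lines_collect)
--                 lines_collect = []
--         else:
--             break
--     return line_collections, lines_collect
-- ===== SOURCE B (Python) =====
-- def gather_JElSteps_line_collections(opt_type: str, text_slice: list[str]) -> tuple[list[list[str]], list[str]]: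
--     """Truncate-then-group re-implementation: cut the blank-free prefix, then
--     group it in a single reversed pass (a flag line is the last line of its
--     group, so scanning backwards it opens the reversed group), and reverse
--     the collected pieces at the end."""
--     flag = f"{opt_type}: Iter:"
--
--     # prefix of lines before the first whitespace-only line
--     prefix = []
--     for line in text_slice:
--         if not line.strip():
--             break
--         prefix.append(line)
--
--     # reversed pass: groups_r = closed groups (reversed, most recent last is
--     # earliest-closing), cur = open reversed group, tail_r = reversed trailing lines
--     groups_r = []
--     tail_r = []
--     cur = None
--     for head in reversed(prefix):
--         if flag in head:
--             if cur is not None: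
--                 groups_r.append(cur)
--             cur = [head]
--         elif cur is not None:
--             cur.append(head)
--         else:
--             tail_r.append(head)
--     if cur is not None:
--         groups_r.append(cur)
--
--     return [g[::-1] for g in reversed(groups_r)], tail_r[::-1]
-- ===== Notes on version B (the rewrite author's own statement) =====
-- stated objective: alternative
-- what changed: Replaces the single interleaved append-and-close accumulator loop by a truncate-then-group decomposition: first cut the prefix before the first blank line, then group it back-to-front in one reversed pass (a flag line opens the reversed group it ends), reversing the collected pieces at the end.
import Mathlib
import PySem

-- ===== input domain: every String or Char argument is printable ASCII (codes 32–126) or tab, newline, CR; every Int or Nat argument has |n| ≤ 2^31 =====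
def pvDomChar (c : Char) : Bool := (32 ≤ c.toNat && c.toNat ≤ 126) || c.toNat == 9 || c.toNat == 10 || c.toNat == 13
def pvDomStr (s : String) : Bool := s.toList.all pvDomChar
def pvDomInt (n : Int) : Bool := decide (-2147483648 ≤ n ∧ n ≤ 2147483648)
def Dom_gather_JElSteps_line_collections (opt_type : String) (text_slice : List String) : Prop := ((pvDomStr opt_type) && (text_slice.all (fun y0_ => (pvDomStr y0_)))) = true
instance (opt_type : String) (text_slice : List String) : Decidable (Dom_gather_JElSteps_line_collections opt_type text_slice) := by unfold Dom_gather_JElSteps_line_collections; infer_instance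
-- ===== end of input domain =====

-- B replaces A's single interleaved append-and-close loop by a truncate-then-group decomposition
-- (cut the prefix before the first blank line, then group it in one reversed pass); alternative, same cost.


-- ===== PORT A =====
-- A's loop: collect non-blank lines, closing a collection after each line containing the flag;
-- stop at the first whitespace-only line.
def pvALoop (flag : String) : List String → List String → List (List String) → List (List String) × List String
  | [], acc, cols => (cols, acc)
  | l :: rest, acc, cols =>
    if PySem.Str.len (PySem.Str.strip l) ≠ 0 then
      if PySem.Str.isIn flag l then
        pvALoop flag rest [] (cols ++ [acc ++ [l]])
      else
        pvALoop flag rest (acc ++ [l]) cols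
    else (cols, acc)

def gather_JElSteps_line_collections (opt_type : String) (text_slice : List String) : List (List String) × List String :=
  pvALoop (opt_type ++ ": Iter:") text_slice [] []

-- ===== PORT B =====
-- prefix of lines before the first whitespace-only line
def pvPrefix : List String → List String
  | [] => []
  | l :: rest => if PySem.Str.strip l = "" then [] else l :: pvPrefix rest

-- one step of B's reversed pass: state = (closed reversed groups, reversed tail, open reversed group)
def pvStepB (flag : String) (st : List (List String) × List String × Option (List String)) (head : String) :
    List (List String) × List String × Option (List String) :=
  if PySem.Str.isIn flag head then
    match st.2.2 with
    | some g => (st.1 ++ [g], st.2.1, some [head])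
    | none => (st.1, st.2.1, some [head])
  else
    match st.2.2 with
    | some g => (st.1, st.2.1, some (g ++ [head]))
    | none => (st.1, st.2.1 ++ [head], none)

def gather_JElSteps_line_collections_alt (opt_type : String) (text_slice : List String) : List (List String) × List String :=
  let flag := opt_type ++ ": Iter:"
  let pfx := pvPrefix text_slice
  let st := pfx.reverse.foldl (pvStepB flag) ([], [], none)
  let groups_r := match st.2.2 with
    | some g => st.1 ++ [g]
    | none => st.1
  ((groups_r.reverse.map List.reverse), st.2.1.reverse)

-- ===== PRECONDITION & SPEC =====
def Spec_gather_JElSteps_line_collections (opt_type : String) (text_slice : List String) (out : List (List String) × List String) : Prop := out = gather_JElSteps_line_collections_alt opt_type text_slice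
instance (opt_type : String) (text_slice : List String) (out : List (List String) × List String) : Decidable (Spec_gather_JElSteps_line_collections opt_type text_slice out) := by unfold Spec_gather_JElSteps_line_collections; infer_instance

-- ===== CLAIM (what is proved, stated in full; the proofs are below) =====
def Claim_equal_gather_JElSteps_line_collections : Prop := ∀ (opt_type : String) (text_slice : List String), Dom_gather_JElSteps_line_collections opt_type text_slice → Spec_gather_JElSteps_line_collections opt_type text_slice (gather_JElSteps_line_collections opt_type text_slice)

-- ===== LEMMAS AND PROOFS =====

-- proof-side reference function: recursive split of a blank-free block into collections
def pvSplitR (flag : String) : List String → List (List String) × List String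
  | [] => ([], [])
  | l :: rest =>
    let r := pvSplitR flag rest
    if PySem.Str.isIn flag l then ([l] :: r.1, r.2)
    else
      match r.1 with
      | [] => ([], l :: r.2)
      | g :: gs => ((l :: g) :: gs, r.2)

theorem pv_len_strip_ne (l : String) :
    (PySem.Str.len (PySem.Str.strip l) ≠ 0) ↔ ¬ (PySem.Str.strip l = "") := by
  rw [PySem.Str.len, ← String.toList_inj]
  simp [String.toList_empty]

-- A's loop computes the split of the blank-free prefix, with the pending accumulator prepended
theorem pvALoop_eq (flag : String) (lines : List String) :
    ∀ (acc : List String) (cols : List (List String)),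
    pvALoop flag lines acc cols =
      match pvSplitR flag (pvPrefix lines) with
      | ([], t) => (cols, acc ++ t)
      | (g :: gs, t) => (cols ++ (acc ++ g) :: gs, t) := by
  induction lines with
  | nil => intro acc cols; simp [pvALoop, pvPrefix, pvSplitR]
  | cons l rest ih =>
    intro acc cols
    by_cases hb : PySem.Str.strip l = ""
    · simp [pvALoop, pvPrefix, pvSplitR, hb]
    · rw [pvALoop, pvPrefix]
      rw [if_pos ((pv_len_strip_ne l).mpr hb), if_neg hb]
      by_cases hf : PySem.Str.isIn flag l
      all_goals simp only [PySem.Str.isIn] at hf ⊢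
      · rw [if_pos hf, ih]
        rcases h : pvSplitR flag (pvPrefix rest) with ⟨gs, t⟩
        cases gs <;> simp [pvSplitR, PySem.Str.isIn, hf, h]
      · rw [if_neg hf, ih]
        rcases h : pvSplitR flag (pvPrefix rest) with ⟨gs, t⟩
        cases gs <;> simp [pvSplitR, PySem.Str.isIn, hf, h]

-- B's reversed pass reaches the state described by the reference split
theorem pvFoldB_eq (flag : String) (lines : List String) :
    lines.reverse.foldl (pvStepB flag) ([], [], none) =
      match pvSplitR flag lines with
      | ([], t) => ([], t.reverse, none)
      | (g :: gs, t) => (gs.reverse.map List.reverse, t.reverse, some g.reverse) := by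
  rw [List.foldl_reverse]
  induction lines with
  | nil => simp [pvSplitR]
  | cons l rest ih =>
    rw [List.foldr_cons, ih]
    rcases h : pvSplitR flag rest with ⟨gs, t⟩
    by_cases hf : PySem.Str.isIn flag l
    all_goals cases gs <;> simp only [PySem.Str.isIn] at hf <;>
      simp [pvSplitR, pvStepB, PySem.Str.isIn, h, hf]

theorem pvAlt_eq (opt_type : String) (text_slice : List String) :
    gather_JElSteps_line_collections_alt opt_type text_slice =
      pvSplitR (opt_type ++ ": Iter:") (pvPrefix text_slice) := by
  show (let flag := opt_type ++ ": Iter:";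
    let pfx := pvPrefix text_slice;
    let st := List.foldl (pvStepB flag) ([], [], none) pfx.reverse;
    let groups_r := match st.2.2 with
      | some g => st.1 ++ [g]
      | none => st.1;
    (List.map List.reverse groups_r.reverse, st.2.1.reverse)) = _
  simp only [pvFoldB_eq]
  rcases h : pvSplitR (opt_type ++ ": Iter:") (pvPrefix text_slice) with ⟨gs, t⟩
  cases gs <;> simp

-- ===== VERDICT (by name: the statement is the Claim_ definition above) =====
theorem gather_JElSteps_line_collections_spec : Claim_equal_gather_JElSteps_line_collections := by
  intro opt_type text_slice _
  unfold Spec_gather_JElSteps_line_collections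
  rw [pvAlt_eq]
  unfold gather_JElSteps_line_collections
  rw [pvALoop_eq]
  rcases h : pvSplitR (opt_type ++ ": Iter:") (pvPrefix text_slice) with ⟨gs, t⟩
  cases gs <;> simp
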